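-- pv_equiv track=rewrite | github.com/littlebox-spb/Codewars | K6 Number Pyramid Series 2 - Sum of Edges.py | sum_edges
-- ===== SOURCE A (Python) =====
-- def sum_edges(n):
--     l=0
--     a=0
--     for i in range(n):
--         a+=i+1
--         l+=(2*a-i,a)[i==0]
--     l+=sum(range(a-n+2,a))
--     return l
-- ===== SOURCE B (Python) =====
-- def sum_edges(n):
--     if n <= 0:
--         return 0
--     if n == 1:
--         return 1
--     return (5 * n**3 - 3 * n**2 + 10 * n - 12) // 6
-- ===== Notes on version B (the rewrite author's own statement) =====
-- stated objective: faster
-- what changed: Replaced the O(n) accumulation loop plus the sum over a second range by a closed-form cubic polynomial in n (floor-divided by a constant), with explicit base cases for nonpositive n and n equal to one.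
import Mathlib
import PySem

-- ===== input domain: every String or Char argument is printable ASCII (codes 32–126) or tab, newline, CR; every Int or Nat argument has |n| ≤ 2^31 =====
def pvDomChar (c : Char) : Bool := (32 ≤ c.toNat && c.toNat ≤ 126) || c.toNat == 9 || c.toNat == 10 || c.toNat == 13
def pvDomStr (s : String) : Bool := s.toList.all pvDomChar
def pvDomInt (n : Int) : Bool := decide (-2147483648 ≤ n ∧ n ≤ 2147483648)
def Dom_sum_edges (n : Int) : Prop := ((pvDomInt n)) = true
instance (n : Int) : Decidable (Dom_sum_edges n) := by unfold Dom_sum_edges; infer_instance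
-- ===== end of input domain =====

-- B replaces A's O(n) loop by the closed-form cubic (5n^3-3n^2+10n-12)//6 (objective: faster, O(1)).

-- ===== PORT A =====
-- range(b) / range(a, b) are ported by hand as (List.range (b-a).toNat).map (a + ·),
-- exactly the value of PySem.List.pyRange a b 1 (lemma pyRange_one); hand-ported here only
-- because its evaluation must not overflow the stack on large n.
def sum_edges (n : Int) : Int :=
  -- l=0; a=0; for i in range(n): a+=i+1; l+=(2*a-i,a)[i==0]
  let p := ((List.range n.toNat).map (fun (k : Nat) => (k : Int))).foldl
    (fun (st : Int × Int) i =>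
      let a := st.2 + (i + 1)
      (st.1 + (if i == 0 then a else 2 * a - i), a)) (0, 0)
  -- l += sum(range(a-n+2, a)); return l
  p.1 + (((List.range (p.2 - (p.2 - n + 2)).toNat).map (fun (k : Nat) => (p.2 - n + 2) + (k : Int))).foldl (· + ·) 0)  -- sum(...) as Python's left fold

-- ===== PORT B =====
def sum_edges_alt (n : Int) : Int :=
  if n ≤ 0 then 0
  else if n = 1 then 1
  else PySem.Int.floordiv (5 * n ^ 3 - 3 * n ^ 2 + 10 * n - 12) 6

-- ===== PRECONDITION & SPEC =====
def Spec_sum_edges (n : Int) (out : Int) : Prop := out = sum_edges_alt n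
instance (n : Int) (out : Int) : Decidable (Spec_sum_edges n out) := by unfold Spec_sum_edges; infer_instance

-- ===== CLAIM (what is proved, stated in full; the proofs are below) =====
def Claim_equal_sum_edges : Prop := ∀ (n : Int), Dom_sum_edges n → Spec_sum_edges n (sum_edges n)

-- ===== LEMMAS AND PROOFS =====

-- A's loop as Nat recursion (proof helper)
def loopA : Nat → Int × Int
  | 0 => (0, 0)
  | m + 1 =>
    let st := loopA m
    let a := st.2 + ((m : Int) + 1)
    (st.1 + (if (m : Int) == 0 then a else 2 * a - (m : Int)), a)

theorem foldl_loopA (m : Nat) :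
    ((List.range m).map (fun (k : Nat) => (k : Int))).foldl
      (fun (st : Int × Int) i =>
        let a := st.2 + (i + 1)
        (st.1 + (if i == 0 then a else 2 * a - i), a)) (0, 0) = loopA m := by
  induction m with
  | zero => simp [loopA]
  | succ m ih =>
    rw [List.range_succ, List.map_append, List.foldl_append, ih]
    rfl

theorem loopA_snd (m : Nat) : 2 * (loopA m).2 = (m : Int) * (m + 1) := by
  induction m with
  | zero => simp [loopA]
  | succ m ih => simp only [loopA]; push_cast; push_cast at ih; nlinarith [ih]

theorem loopA_fst (m : Nat) (hm : 1 ≤ m) :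
    6 * (loopA m).1 = 2 * (m : Int) ^ 3 + 3 * (m : Int) ^ 2 + 7 * (m : Int) - 6 := by
  induction m with
  | zero => omega
  | succ m ih =>
    rcases Nat.eq_zero_or_pos m with h0 | h1
    · subst h0; simp [loopA]
    · have ih' := ih h1
      have hs := loopA_snd m
      have hne : ¬ ((m : Int) == 0) = true := by
        simp only [beq_iff_eq]
        exact_mod_cast Nat.pos_iff_ne_zero.mp h1
      simp only [loopA, hne, Bool.false_eq_true, if_false]
      push_cast
      push_cast at ih' hs
      nlinarith [ih', hs]

theorem sum_range_shift (a : Int) (k : Nat) :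
    2 * (((List.range k).map (fun (j : Nat) => a + (j : Int))).sum) = (k : Int) * (2 * a + (k : Int) - 1) := by
  induction k with
  | zero => simp
  | succ k ih =>
    rw [List.range_succ, List.map_append, List.sum_append]
    simp only [List.map_cons, List.map_nil, List.sum_cons, List.sum_nil, add_zero]
    push_cast
    push_cast at ih
    linear_combination ih

-- ===== VERDICT (by name: the statement is the Claim_ definition above) =====
theorem sum_edges_spec : Claim_equal_sum_edges := by
  intro n _
  unfold Spec_sum_edges
  by_cases hle : n ≤ 0
  · -- loop runs zero times; both ranges are empty
    have h0 : n.toNat = 0 := Int.toNat_of_nonpos hle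
    simp [sum_edges, sum_edges_alt, if_pos hle, h0,
      (show (-2 + n).toNat = 0 by omega)]
  · have hpos : 0 < n := by omega
    obtain ⟨m, rfl⟩ : ∃ m : Nat, n = (m : Int) :=
      ⟨n.toNat, (Int.toNat_of_nonneg (le_of_lt hpos)).symm⟩
    have hm1 : 1 ≤ m := by exact_mod_cast hpos
    rcases Nat.lt_or_ge m 2 with h2 | h2
    · -- m = 1
      interval_cases m
      decide
    · -- m ≥ 2 : closed form
      have hL := loopA_fst m hm1
      have hT := loopA_snd m
      set L := (loopA m).1 with hLdef
      set T := (loopA m).2 with hTdef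
      have hm2 : (2 : Int) ≤ (m : Int) := by exact_mod_cast h2
      have hk : (T - (T - (m : Int) + 2)).toNat = m - 2 := by omega
      have hS := sum_range_shift (T - (m : Int) + 2) (m - 2)
      have hcast2 : ((m - 2 : Nat) : Int) = (m : Int) - 2 := by
        push_cast [Nat.cast_sub h2]; ring
      rw [hcast2] at hS
      -- evaluate port A
      have hA : sum_edges (m : Int) =
          L + (((List.range (m - 2)).map (fun (k : Nat) => (T - (m : Int) + 2) + (k : Int))).sum) := by
        simp only [sum_edges, Int.toNat_natCast, foldl_loopA, ← hLdef, ← hTdef, hk,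
          ← List.sum_eq_foldl]
      -- evaluate port B
      have hnle : ¬ ((m : Int) ≤ 0) := by omega
      have hne1 : ¬ ((m : Int) = 1) := by omega
      rw [hA, sum_edges_alt, if_neg hnle, if_neg hne1]
      set S := (((List.range (m - 2)).map (fun (k : Nat) => (T - (m : Int) + 2) + (k : Int))).sum) with hSdef
      have h6 : 6 * (L + S) = 5 * (m : Int) ^ 3 - 3 * (m : Int) ^ 2 + 10 * (m : Int) - 12 := by
        nlinarith [hL, hT, hS]
      rw [eq_comm, PySem.Int.floordiv_eq_iff_of_pos (by norm_num : (0 : Int) < 6)]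
      constructor <;> nlinarith [h6]
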